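-- pv_equiv track=rewrite | github.com/mrthock/notispf | notispf/display.py | _build_ruler
-- ===== SOURCE A (Python) =====
-- def _build_ruler(width: int) -> str:
--     """Build an ISPF-style column ruler for the given text width."""
--     ruler = []
--     for col in range(1, width + 1):
--         if col % 10 == 0:
--             ruler.append(str(col // 10 % 10))
--         elif col % 5 == 0:
--             ruler.append('+')
--         else:
--             ruler.append('-')
--     return ''.join(ruler)
-- ===== SOURCE B (Python) =====
-- def _build_ruler(width: int) -> str:
--     ruler = ['-'] * width
--     for col in range(5, width + 1, 5):
--         ruler[col - 1] = '+'
--     for col in range(10, width + 1, 10):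
--         ruler[col - 1] = str(col // 10 % 10)
--     return ''.join(ruler)
-- ===== Notes on version B (the rewrite author's own statement) =====
-- stated objective: faster
-- what changed: Replaces A's single per-column three-way branch loop with a paint-then-overwrite scheme: allocate a '-' row in one bulk operation, then two strided passes (step 5 and step 10, the digit pass overwriting the shared '+' positions) touch only every fifth/tenth cell.
import Mathlib
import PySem

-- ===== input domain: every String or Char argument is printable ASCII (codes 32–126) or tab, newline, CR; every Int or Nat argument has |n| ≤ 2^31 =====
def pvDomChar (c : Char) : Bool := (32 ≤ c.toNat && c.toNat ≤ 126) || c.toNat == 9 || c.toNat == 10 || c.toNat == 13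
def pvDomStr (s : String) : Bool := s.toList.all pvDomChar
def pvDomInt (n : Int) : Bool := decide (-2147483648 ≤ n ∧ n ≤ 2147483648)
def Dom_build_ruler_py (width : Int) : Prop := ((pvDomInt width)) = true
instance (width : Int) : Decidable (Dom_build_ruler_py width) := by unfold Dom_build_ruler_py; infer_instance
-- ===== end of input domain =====

-- B replaces A's per-column three-way branch with a bulk '-' fill overwritten by two strided passes (step 5, then step 10); measured faster by a constant factor.

-- ===== PORT A =====
def build_ruler_py (width : Int) : String :=
  let ruler : List String :=
    (PySem.List.pyRange 1 (width + 1) 1).foldl (fun acc col =>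
      if PySem.Int.mod col 10 = 0 then
        acc ++ [PySem.Int.toStr (PySem.Int.mod (PySem.Int.floordiv col 10) 10)]
      else if PySem.Int.mod col 5 = 0 then
        acc ++ ["+"]
      else
        acc ++ ["-"]) []
  PySem.Str.join "" ruler

-- ===== PORT B =====
def build_ruler_py_alt (width : Int) : String :=
  let ruler : List String := PySem.List.pyRepeat ["-"] width
  let ruler :=
    (PySem.List.pyRange 5 (width + 1) 5).foldl (fun acc col =>
      PySem.List.pySetD acc (col - 1) "+") ruler
  let ruler :=
    (PySem.List.pyRange 10 (width + 1) 10).foldl (fun acc col =>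
      PySem.List.pySetD acc (col - 1) (PySem.Int.toStr (PySem.Int.mod (PySem.Int.floordiv col 10) 10))) ruler
  PySem.Str.join "" ruler

-- ===== PRECONDITION & SPEC =====
def Spec_build_ruler_py (width : Int) (out : String) : Prop := out = build_ruler_py_alt width
instance (width : Int) (out : String) : Decidable (Spec_build_ruler_py width out) := by unfold Spec_build_ruler_py; infer_instance

-- ===== CLAIM (what is proved, stated in full; the proofs are below) =====
def Claim_equal_build_ruler_py : Prop := ∀ (width : Int), Dom_build_ruler_py width → Spec_build_ruler_py width (build_ruler_py width)

-- ===== LEMMAS AND PROOFS =====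

-- the cell A writes at column col
def pvCell (col : Int) : String :=
  if PySem.Int.mod col 10 = 0 then PySem.Int.toStr (PySem.Int.mod (PySem.Int.floordiv col 10) 10)
  else if PySem.Int.mod col 5 = 0 then "+" else "-"

-- A's foldl-append loop is a map
theorem pv_foldl_append (cols : List Int) (acc : List String) :
    cols.foldl (fun acc col =>
      if PySem.Int.mod col 10 = 0 then
        acc ++ [PySem.Int.toStr (PySem.Int.mod (PySem.Int.floordiv col 10) 10)]
      else if PySem.Int.mod col 5 = 0 then
        acc ++ ["+"]
      else
        acc ++ ["-"]) acc = acc ++ cols.map pvCell := by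
  induction cols generalizing acc with
  | nil => simp
  | cons c cs ih =>
    simp only [List.foldl_cons, List.map_cons]
    rw [ih]
    unfold pvCell
    split_ifs <;> simp

theorem pv_foldl_set_length (cols : List Int) (v : Int → String) (xs : List String) :
    (cols.foldl (fun acc col => PySem.List.pySetD acc (col - 1) (v col)) xs).length = xs.length := by
  induction cols generalizing xs with
  | nil => rfl
  | cons c cs ih => simp [List.foldl_cons, ih, PySem.List.length_pySetD]

-- element of a strided overwrite pass: the value is a function of the index, so overwrites agree
theorem pv_foldl_set_get (cols : List Int) (hpos : ∀ c ∈ cols, 1 ≤ c) (v : Int → String)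
    (xs : List String) (j : Nat) (hj : j < xs.length) :
    (cols.foldl (fun acc col => PySem.List.pySetD acc (col - 1) (v col)) xs)[j]'(by
        rw [pv_foldl_set_length]; exact hj) =
      if ((j : Int) + 1) ∈ cols then v ((j : Int) + 1) else xs[j] := by
  induction cols generalizing xs with
  | nil => simp
  | cons c cs ih =>
    have hc : 1 ≤ c := hpos c (List.mem_cons_self ..)
    simp only [List.foldl_cons]
    have hlen : (PySem.List.pySetD xs (c - 1) (v c)).length = xs.length :=
      PySem.List.length_pySetD ..
    rw [ih (fun x hx => hpos x (List.mem_cons_of_mem _ hx)) _ (by rw [hlen]; exact hj)]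
    simp only [PySem.List.pySetD_of_nonneg xs (v c) (show (0:Int) ≤ c - 1 by omega)]
    by_cases hmem : ((j : Int) + 1) ∈ cs
    · simp [hmem]
    · by_cases hcj : c = (j : Int) + 1
      · have h1 : c.toNat - 1 = j := by omega
        simp [hmem, hcj, h1, List.getElem_set]
      · have hne : c.toNat - 1 ≠ j := by omega
        have hne' : ((j : Int) + 1) ≠ c := by omega
        simp [hmem, List.getElem_set, hne, List.mem_cons, hcj, hne']

-- membership in the strided ranges of B, for an index inside the row
theorem pv_mem_stride (s : Int) (hs : 0 < s) (w j : Int) (h1 : 1 ≤ j) (h2 : j ≤ w) :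
    j ∈ PySem.List.pyRange s (w + 1) s ↔ s ∣ j := by
  rw [PySem.List.mem_pyRange_iff_of_pos hs]
  constructor
  · rintro ⟨ha, _, k, hk⟩
    exact ⟨k + 1, by linear_combination hk⟩
  · rintro ⟨k, hk⟩
    have hk1 : 1 ≤ k := by nlinarith
    refine ⟨by nlinarith, by omega, k - 1, by rw [hk]; ring⟩

theorem pv_lists_eq (width : Int) :
    ((PySem.List.pyRange 10 (width + 1) 10).foldl (fun acc col =>
        PySem.List.pySetD acc (col - 1) (PySem.Int.toStr (PySem.Int.mod (PySem.Int.floordiv col 10) 10)))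
      ((PySem.List.pyRange 5 (width + 1) 5).foldl (fun acc col =>
        PySem.List.pySetD acc (col - 1) "+") (PySem.List.pyRepeat ["-"] width)))
    = (PySem.List.pyRange 1 (width + 1) 1).map pvCell := by
  have hrep : (PySem.List.pyRepeat ["-"] width) = List.replicate width.toNat "-" :=
    PySem.List.pyRepeat_singleton ..
  have hl5 : ∀ c ∈ PySem.List.pyRange 5 (width + 1) 5, (1 : Int) ≤ c := by
    intro c hc
    rw [PySem.List.mem_pyRange_iff_of_pos (by norm_num)] at hc
    omega
  have hl10 : ∀ c ∈ PySem.List.pyRange 10 (width + 1) 10, (1 : Int) ≤ c := by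
    intro c hc
    rw [PySem.List.mem_pyRange_iff_of_pos (by norm_num)] at hc
    omega
  have hlen5 : ((PySem.List.pyRange 5 (width + 1) 5).foldl (fun acc col =>
      PySem.List.pySetD acc (col - 1) "+") (PySem.List.pyRepeat ["-"] width)).length = width.toNat := by
    rw [pv_foldl_set_length, hrep, List.length_replicate]
  apply List.ext_getElem
  · rw [pv_foldl_set_length, hlen5, List.length_map, PySem.List.length_pyRange_one]
    omega
  · intro j hj hj'
    have hjw : j < width.toNat := by rwa [pv_foldl_set_length, hlen5] at hj
    have hjw' : ((j : Int) + 1) ≤ width := by omega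
    have hj1 : (1 : Int) ≤ (j : Int) + 1 := by omega
    have h10 : PySem.Int.mod ((j : Int) + 1) 10 = 0 ↔ (10 : Int) ∣ ((j : Int) + 1) :=
      PySem.Int.mod_eq_zero_iff_dvd ..
    have h5 : PySem.Int.mod ((j : Int) + 1) 5 = 0 ↔ (5 : Int) ∣ ((j : Int) + 1) :=
      PySem.Int.mod_eq_zero_iff_dvd ..
    refine Eq.trans (pv_foldl_set_get _ hl10
      (fun col => PySem.Int.toStr (PySem.Int.mod (PySem.Int.floordiv col 10) 10)) _ j
      (by rw [hlen5]; exact hjw)) ?_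
    simp only [pv_mem_stride 10 (by norm_num) width _ hj1 hjw',
        List.getElem_map, PySem.List.getElem_pyRange_one,
        show (1 + (j : Int)) = (j : Int) + 1 by ring]
    by_cases hd10 : (10 : Int) ∣ ((j : Int) + 1)
    · rw [if_pos hd10]
      unfold pvCell
      rw [if_pos (h10.mpr hd10)]
    · rw [if_neg hd10]
      refine Eq.trans (pv_foldl_set_get _ hl5 (fun _ => "+") _ j
        (by rw [hrep, List.length_replicate]; exact hjw)) ?_
      simp only [pv_mem_stride 5 (by norm_num) width _ hj1 hjw']
      unfold pvCell
      rw [if_neg (fun h => hd10 (h10.mp h))]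
      by_cases hd5 : (5 : Int) ∣ ((j : Int) + 1)
      · rw [if_pos hd5, if_pos (h5.mpr hd5)]
      · rw [if_neg hd5, if_neg (fun h => hd5 (h5.mp h))]
        simp [hrep]

-- ===== VERDICT (by name: the statement is the Claim_ definition above) =====
theorem build_ruler_py_spec : Claim_equal_build_ruler_py := by
  intro width _
  unfold Spec_build_ruler_py build_ruler_py build_ruler_py_alt
  simp only
  rw [pv_foldl_append, pv_lists_eq, List.nil_append]
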